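-- pv_equiv track=rewrite | github.com/eapenkuruvilla/MBD | detectors/brakes_inconsistency.py | _parse_wheel_brakes
-- ===== SOURCE A (Python) =====
-- from typing import Optional
--
-- def _parse_wheel_brakes(wb) -> Optional[bool]:
--     """
--     Return True if any wheel brake is active, False if none are active,
--     or None if the field is missing/unavailable/malformed.
--     """
--     if not isinstance(wb, str) or len(wb) != 5:
--         return None
--     if wb[0] == '1':          # unavailable bit set
--         return None
--     if any(c not in ('0', '1') for c in wb):
--         return None
--     return any(c == '1' for c in wb[1:])
-- ===== SOURCE B (Python) =====
-- from typing import Optional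
--
-- # All 16 strings that denote "valid and available" wheel-brake fields, each
-- # mapped once to whether any of the four brake bits is set; parsing is then a
-- # single table lookup, with every other string mapping to None automatically.
-- _TABLE = {'0' + format(i, '04b'): bool(i) for i in range(16)}
--
-- def _parse_wheel_brakes(wb) -> Optional[bool]:
--     """
--     Return True if any wheel brake is active, False if none are active,
--     or None if the field is missing/unavailable/malformed.
--     """
--     if not isinstance(wb, str):
--         return None
--     return _TABLE.get(wb)
-- ===== Notes on version B (the rewrite author's own statement) =====
-- stated objective: alternative
-- what changed: A validates the string character by character in staged guard clauses and scans for an active bit; B precomputes once the finite set of all 16 valid-and-available 5-bit strings as a dict mapping each to its answer, so parsing is a single hash-table lookup with no per-character scanning.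
import Mathlib
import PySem

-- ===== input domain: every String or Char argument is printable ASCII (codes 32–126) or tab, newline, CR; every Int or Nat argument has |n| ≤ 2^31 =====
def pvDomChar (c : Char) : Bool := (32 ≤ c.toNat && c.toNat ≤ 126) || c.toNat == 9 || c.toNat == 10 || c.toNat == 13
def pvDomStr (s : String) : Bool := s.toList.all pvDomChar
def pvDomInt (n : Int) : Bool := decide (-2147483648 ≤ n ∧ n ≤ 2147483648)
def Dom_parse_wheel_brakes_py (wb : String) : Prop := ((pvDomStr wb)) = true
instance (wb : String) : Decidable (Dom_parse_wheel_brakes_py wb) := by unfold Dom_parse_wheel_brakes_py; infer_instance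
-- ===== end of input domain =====

-- B replaces A's per-character staged validation by a precomputed 16-entry lookup
-- table of every valid-and-available string; same values, different algorithm.

-- ===== PORT A =====
def parse_wheel_brakes_py (wb : String) : Option Bool :=
  if PySem.Str.len wb ≠ 5 then none
  else if PySem.Str.pyGet? wb 0 = some '1' then none
  else if wb.toList.any (fun c => c ≠ '0' && c ≠ '1') then none
  else some ((PySem.Str.slice wb (some 1) none).toList.any (fun c => c == '1'))

-- ===== PORT B =====
-- format(i, '04b') for 0 ≤ i < 16: binary digits zero-padded on the left to width 4
def pwbKey (i : Int) : String :=
  String.ofList ('0' :: (List.replicate (4 - (PySem.Int.toBinChars i).length) '0'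
                      ++ PySem.Int.toBinChars i))

-- _TABLE = {'0' + format(i, '04b'): bool(i) for i in range(16)}
def pwbTable : PySem.Dict String Bool :=
  (PySem.List.pyRange 0 16 1).foldl
    (fun d i => d.insert (pwbKey i) (decide (i ≠ 0))) PySem.Dict.empty

def parse_wheel_brakes_py_alt (wb : String) : Option Bool :=
  pwbTable.get? wb

-- ===== PRECONDITION & SPEC =====
def Spec_parse_wheel_brakes_py (wb : String) (out : Option Bool) : Prop := out = parse_wheel_brakes_py_alt wb
instance (wb : String) (out : Option Bool) : Decidable (Spec_parse_wheel_brakes_py wb out) := by unfold Spec_parse_wheel_brakes_py; infer_instance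

-- ===== CLAIM (what is proved, stated in full; the proofs are below) =====
def Claim_equal_parse_wheel_brakes_py : Prop := ∀ (wb : String), Dom_parse_wheel_brakes_py wb → Spec_parse_wheel_brakes_py wb (parse_wheel_brakes_py wb)

-- ===== LEMMAS AND PROOFS =====

theorem pwb_keys_lists :
    pwbTable.keys.map String.toList =
      [['0','0','0','0','0'], ['0','0','0','0','1'], ['0','0','0','1','0'], ['0','0','0','1','1'],
       ['0','0','1','0','0'], ['0','0','1','0','1'], ['0','0','1','1','0'], ['0','0','1','1','1'],
       ['0','1','0','0','0'], ['0','1','0','0','1'], ['0','1','0','1','0'], ['0','1','0','1','1'],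
       ['0','1','1','0','0'], ['0','1','1','0','1'], ['0','1','1','1','0'], ['0','1','1','1','1']] := by
  decide

theorem pwb_mem_keys_iff (wb : String) :
    wb ∈ pwbTable.keys ↔ wb.toList ∈ pwbTable.keys.map String.toList := by
  constructor
  · exact fun h => List.mem_map_of_mem h
  · intro h
    rcases List.mem_map.mp h with ⟨x, hx, hex⟩
    rwa [← String.toList_inj.mp hex]

theorem pwb_get?_none (wb : String) (h : wb ∉ pwbTable.keys) :
    pwbTable.get? wb = none :=
  (PySem.Dict.get?_eq_none_iff_not_mem_keys pwbTable wb).mpr h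

-- ===== VERDICT (by name: the statement is the Claim_ definition above) =====
theorem parse_wheel_brakes_py_spec : Claim_equal_parse_wheel_brakes_py := by
  intro wb _
  unfold Spec_parse_wheel_brakes_py parse_wheel_brakes_py parse_wheel_brakes_py_alt
  by_cases hlen : PySem.Str.len wb = 5
  · have h5 : wb.toList.length = 5 := by
      have := hlen
      rw [PySem.Str.len_eq] at this
      exact_mod_cast this
    obtain ⟨a, b, c, d, e, hl⟩ : ∃ a b c d e, wb.toList = [a, b, c, d, e] := by
      match hll : wb.toList, h5 with
      | [a, b, c, d, e], _ => exact ⟨a, b, c, d, e, rfl⟩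
    by_cases ha1 : a = '1'
    · subst ha1
      have hnm : wb ∉ pwbTable.keys := by
        rw [pwb_mem_keys_iff, pwb_keys_lists, hl]
        simp
      rw [pwb_get?_none wb hnm]
      simp [PySem.Str.pyGet?_eq, PySem.Chars.pyGet?, PySem.List.pyGet?, PySem.List.pyIdx?, hl]
    · by_cases hinv : wb.toList.any (fun c => c ≠ '0' && c ≠ '1') = true
      · have hnm : wb ∉ pwbTable.keys := by
          rw [pwb_mem_keys_iff, pwb_keys_lists, hl]
          intro hmem
          rw [hl] at hinv
          simp only [List.mem_cons, List.not_mem_nil, or_false, List.cons.injEq, and_true] at hmem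
          rcases hmem with ⟨rfl,rfl,rfl,rfl,rfl⟩|⟨rfl,rfl,rfl,rfl,rfl⟩|⟨rfl,rfl,rfl,rfl,rfl⟩|⟨rfl,rfl,rfl,rfl,rfl⟩|⟨rfl,rfl,rfl,rfl,rfl⟩|⟨rfl,rfl,rfl,rfl,rfl⟩|⟨rfl,rfl,rfl,rfl,rfl⟩|⟨rfl,rfl,rfl,rfl,rfl⟩|⟨rfl,rfl,rfl,rfl,rfl⟩|⟨rfl,rfl,rfl,rfl,rfl⟩|⟨rfl,rfl,rfl,rfl,rfl⟩|⟨rfl,rfl,rfl,rfl,rfl⟩|⟨rfl,rfl,rfl,rfl,rfl⟩|⟨rfl,rfl,rfl,rfl,rfl⟩|⟨rfl,rfl,rfl,rfl,rfl⟩|⟨rfl,rfl,rfl,rfl,rfl⟩ <;>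
            simp at hinv
        rw [pwb_get?_none wb hnm]
        rw [hl] at hinv
        simp [PySem.Str.pyGet?_eq, PySem.Chars.pyGet?, PySem.List.pyGet?, PySem.List.pyIdx?, hl, ha1]
        intro ha0 hbv hcv hdv
        subst ha0
        simp at hinv
        tauto
      · -- fully valid string: it is one of the 16 table keys
        have hval : ∀ x ∈ wb.toList, x = '0' ∨ x = '1' := by
          intro x hx
          by_contra hc
          push Not at hc
          have : wb.toList.any (fun z => z ≠ '0' && z ≠ '1') = true := by
            refine List.any_eq_true.mpr ⟨x, hx, ?_⟩
            simp [hc.1, hc.2]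
          exact hinv this
        have ha0 : a = '0' := by
          rcases hval a (by rw [hl]; simp) with h | h
          · exact h
          · exact absurd h ha1
        subst ha0
        have hb := hval b (by rw [hl]; simp)
        have hc := hval c (by rw [hl]; simp)
        have hd := hval d (by rw [hl]; simp)
        have he := hval e (by rw [hl]; simp)
        have hw : String.ofList wb.toList = wb := String.toList_inj.mp (String.toList_ofList)
        rcases hb with rfl | rfl <;> rcases hc with rfl | rfl <;>
          rcases hd with rfl | rfl <;> rcases he with rfl | rfl <;>
          · rw [← hw, hl]
            decide
  · have hnm : wb ∉ pwbTable.keys := by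
      rw [pwb_mem_keys_iff, pwb_keys_lists]
      intro hmem
      apply hlen
      rw [PySem.Str.len_eq]
      have h5 : wb.toList.length = 5 := by
        simp only [List.mem_cons, List.not_mem_nil, or_false] at hmem
        rcases hmem with h|h|h|h|h|h|h|h|h|h|h|h|h|h|h|h <;> simp [h]
      rw [h5]
      norm_num
    have hlen2 : ¬((wb.length : Int) = 5) := fun h => hlen (by rw [PySem.Str.len_eq, String.length_toList]; exact h)
    rw [pwb_get?_none wb hnm]
    simp [hlen2]
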